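-- pv_equiv track=rewrite | github.com/software-competence-center-hagenberg/DSL-Code-Completion | neural_attention_and_pointer_networks/tti_dataset.py | data_gen
-- ===== SOURCE A (Python) =====
-- def fix_parent(p, start_i):
--     p -= start_i
--     return 0 if p < 0 else p
--
-- def data_gen(data, split_size):
--     for sample in data:
--         accum_n = []
--         accum_t = []
--         accum_p = []
--         start_i = 0
--
--         for i, item in enumerate(zip(*sample)):
--             n, t, p = item
--             p = fix_parent(p, start_i)
--             accum_n.append(n)
--             accum_t.append(t)
--             accum_p.append(p)
--
--             if len(accum_n) == split_size:
--                 yield accum_n, accum_t, accum_p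
--                 accum_n = []
--                 accum_t = []
--                 accum_p = []
--                 start_i = i
--
--         if len(accum_n) > 0:
--             yield accum_n, accum_t, accum_p
-- ===== SOURCE B (Python) =====
-- def data_gen(data, split_size):
--     for sample in data:
--         items = list(zip(*sample))
--         step = split_size if split_size > 0 else len(items)
--         base = 0
--         while base < len(items):
--             chunk = items[base:base + step]
--             offset = base - 1 if base else 0
--             yield ([x[0] for x in chunk],
--                    [x[1] for x in chunk],
--                    [max(0, x[2] - offset) for x in chunk])
--             base += step
-- ===== Notes on version B (the rewrite author's own statement) =====
-- stated objective: alternative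
-- what changed: B replaces A's streaming accumulate-and-reset loop (three growing accumulator lists, a start_i register reset at each full chunk) by materialize-then-slice: it zips the sample once, walks chunk bases in steps of split_size, slices each chunk and maps the parent fix max(0, p-(base-1)) over it.
import Mathlib
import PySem

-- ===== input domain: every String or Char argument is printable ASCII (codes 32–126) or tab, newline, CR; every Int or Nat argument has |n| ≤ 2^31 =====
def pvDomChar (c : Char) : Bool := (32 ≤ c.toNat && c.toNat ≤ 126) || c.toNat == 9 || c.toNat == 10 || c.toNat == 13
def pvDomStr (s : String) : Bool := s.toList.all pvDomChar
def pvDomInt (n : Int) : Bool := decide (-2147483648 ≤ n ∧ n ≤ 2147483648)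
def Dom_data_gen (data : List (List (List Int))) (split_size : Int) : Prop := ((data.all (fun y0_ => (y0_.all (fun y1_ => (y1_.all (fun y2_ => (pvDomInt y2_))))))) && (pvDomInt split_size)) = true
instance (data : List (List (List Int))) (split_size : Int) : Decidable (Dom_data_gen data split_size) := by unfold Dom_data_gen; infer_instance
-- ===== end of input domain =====

-- B replaces A's streaming accumulate/reset generator loop by materialize-then-slice chunking
-- over precomputed chunk bases (same cost, different decomposition; return values only — both are generators in Python).


-- ===== PORT A =====
-- zip(*sample): list of columns, truncated at the shortest row (shared by both ports).
def pyzip (rows : List (List Int)) : List (List Int) :=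
  match rows with
  | [] => []
  | r :: rs =>
    (List.range (rs.foldl (fun a b => min a b.length) r.length)).map
      (fun i => (r :: rs).map (fun row => row.getD i 0))

def fixParent (p start_i : Int) : Int :=
  let p' := p - start_i
  if p' < 0 then 0 else p'

-- A's inner 'for i, item in enumerate(zip(*sample))' loop as structural recursion over the
-- same state (accum_n, accum_t, accum_p, start_i); i is the enumerate index.
def goA (items : List (List Int)) (i : Nat) (an at_ ap : List Int) (start_i : Int)
    (s : Int) : List (List Int × List Int × List Int) :=
  match items with
  | [] => if an.length > 0 then [(an, at_, ap)] else []
  | item :: rest =>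
    match item with
    | [n, t, p] =>
      let p' := fixParent p start_i
      let an' := an ++ [n]
      let at' := at_ ++ [t]
      let ap' := ap ++ [p']
      if (an'.length : Int) = s then
        (an', at', ap') :: goA rest (i + 1) [] [] [] (i : Int) s
      else
        goA rest (i + 1) an' at' ap' start_i s
    | _ => goA rest (i + 1) an at_ ap start_i s
      -- Python raises ValueError (unpacking a tuple whose length ≠ 3); excluded by Pre_data_gen

def data_gen (data : List (List (List Int))) (split_size : Int) : List (List Int × List Int × List Int) :=
  data.flatMap (fun sample => goA (pyzip sample) 0 [] [] [] 0 split_size)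

-- ===== PORT B =====
-- B's 'while base < len(items)' loop; step ≥ 1 whenever the guard holds, the 0 < step
-- conjunct only makes the recursion well-founded.
def goB (items : List (List Int)) (step : Int) (base : Nat) :
    List (List Int × List Int × List Int) :=
  if h : base < items.length ∧ 0 < step then
    let chunk := PySem.List.slice items (some (base : Int)) (some ((base : Int) + step))
    let off : Int := if base = 0 then 0 else (base : Int) - 1
    (chunk.map (fun x => PySem.List.pyGetD x 0 0),   -- x[0]; index is in range under Pre_
     chunk.map (fun x => PySem.List.pyGetD x 1 0),
     chunk.map (fun x => max 0 (PySem.List.pyGetD x 2 0 - off))) ::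
      goB items step (base + step.toNat)
  else []
  termination_by items.length - base
  decreasing_by omega

def data_gen_alt (data : List (List (List Int))) (split_size : Int) : List (List Int × List Int × List Int) :=
  data.flatMap (fun sample =>
    let items := pyzip sample
    let step : Int := if 0 < split_size then split_size else (items.length : Int)
    goB items step 0)

-- ===== PRECONDITION & SPEC =====
-- Pre_ excludes exactly the inputs on which Python A raises ValueError: a sample with a
-- row-count other than 3 whose columns are nonempty ('n, t, p = item' fails to unpack).
def Pre_data_gen (data : List (List (List Int))) (split_size : Int) : Prop :=
  ∀ sample ∈ data, sample.length = 3 ∨ sample = [] ∨ [] ∈ sample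
instance (data : List (List (List Int))) (split_size : Int) : Decidable (Pre_data_gen data split_size) := by unfold Pre_data_gen; infer_instance

def pvWitness_data_gen : List (List (List Int)) × Int :=
  ([[[1, 2, 5], [3, 4, 6], [0, 1, 0]], [[7], [8], [9]], []], 2)

def Spec_data_gen (data : List (List (List Int))) (split_size : Int) (out : List (List Int × List Int × List Int)) : Prop := out = data_gen_alt data split_size
instance (data : List (List (List Int))) (split_size : Int) (out : List (List Int × List Int × List Int)) : Decidable (Spec_data_gen data split_size out) := by unfold Spec_data_gen; infer_instance

-- ===== CLAIM (what is proved, stated in full; the proofs are below) =====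
def Claim_equal_data_gen : Prop := ∀ (data : List (List (List Int))) (split_size : Int), Dom_data_gen data split_size → Pre_data_gen data split_size → Spec_data_gen data split_size (data_gen data split_size)

-- ===== LEMMAS AND PROOFS =====

theorem fixParent_eq (p st : Int) : fixParent p st = max 0 (p - st) := by
  simp [fixParent]; omega

theorem get0 (n t p : Int) : PySem.List.pyGetD [n, t, p] 0 0 = n := rfl
theorem get1 (n t p : Int) : PySem.List.pyGetD [n, t, p] 1 0 = t := rfl
theorem get2 (n t p : Int) : PySem.List.pyGetD [n, t, p] 2 0 = p := rfl

-- every column has exactly the sample's row count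
theorem pyzip_mem_length (sample : List (List Int)) :
    ∀ x ∈ pyzip sample, x.length = sample.length := by
  cases sample with
  | nil => intro x hx; simp [pyzip] at hx
  | cons r rs =>
    intro x hx
    simp only [pyzip, List.mem_map, List.mem_range] at hx
    obtain ⟨i, _, rfl⟩ := hx
    simp

theorem foldl_min_le (rs : List (List Int)) (a : Nat) :
    rs.foldl (fun a b => min a b.length) a ≤ a := by
  induction rs generalizing a with
  | nil => simp
  | cons b bs ih => exact le_trans (ih _) (by simp)

theorem foldl_min_le_mem (rs : List (List Int)) (a : Nat) (b : List Int) (hb : b ∈ rs) :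
    rs.foldl (fun a b => min a b.length) a ≤ b.length := by
  induction rs generalizing a with
  | nil => simp at hb
  | cons c cs ih =>
    simp only [List.mem_cons] at hb
    rcases hb with hb | hb
    · subst hb
      exact le_trans (foldl_min_le cs _) (min_le_right _ _)
    · exact ih _ hb

theorem pyzip_eq_nil_of_mem_nil (sample : List (List Int)) (h : [] ∈ sample) :
    pyzip sample = [] := by
  cases sample with
  | nil => rfl
  | cons r rs =>
    have hz : rs.foldl (fun a b => min a b.length) r.length = 0 := by
      rcases List.mem_cons.mp h with h | h
      · have h1 := foldl_min_le rs r.length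
        have h2 : r.length = 0 := by rw [← h]; rfl
        omega
      · have := foldl_min_le_mem rs r.length [] h
        simpa using this
    simp [pyzip, hz]


-- A's loop from an arbitrary mid-chunk state: it fills the current chunk and, if items
-- remain, resets exactly at the chunk boundary (the heart of the equivalence).
theorem goA_chunk (s : Int) (hs : 0 < s) :
    ∀ (items : List (List Int)), (∀ x ∈ items, ∃ n t p, x = [n, t, p]) →
    ∀ (i : Nat) (an at_ ap : List Int) (st : Int),
    at_.length = an.length → ap.length = an.length → (an.length : Int) < s →
    goA items i an at_ ap st s =
      if items.length + an.length ≤ s.toNat then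
        (if an = [] ∧ items = [] then [] else
          [(an ++ items.map (fun x => PySem.List.pyGetD x 0 0),
            at_ ++ items.map (fun x => PySem.List.pyGetD x 1 0),
            ap ++ items.map (fun x => max 0 (PySem.List.pyGetD x 2 0 - st)))])
      else
        (an ++ (items.take (s.toNat - an.length)).map (fun x => PySem.List.pyGetD x 0 0),
         at_ ++ (items.take (s.toNat - an.length)).map (fun x => PySem.List.pyGetD x 1 0),
         ap ++ (items.take (s.toNat - an.length)).map (fun x => max 0 (PySem.List.pyGetD x 2 0 - st))) ::
        goA (items.drop (s.toNat - an.length)) (i + (s.toNat - an.length)) [] [] [] ((i : Int) + ((s.toNat - an.length : Nat) : Int) - 1) s := by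
  intro items
  induction items with
  | nil =>
    intro _ i an at_ ap st hat hap hlt
    have hle : an.length < s.toNat := by omega
    simp only [goA, List.length_nil, Nat.zero_add, if_pos (le_of_lt hle)]
    by_cases han : an = []
    · subst han
      simp
    · have : an.length > 0 := List.length_pos_iff.mpr han
      simp [han, this]
  | cons x rest ih =>
    intro h3 i an at_ ap st hat hap hlt
    obtain ⟨n, t, p, rfl⟩ := h3 _ (List.mem_cons_self)
    have h3' : ∀ y ∈ rest, ∃ n t p, y = [n, t, p] := fun y hy => h3 y (List.mem_cons_of_mem _ hy)
    simp only [goA]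
    by_cases hfull : ((an ++ [n]).length : Int) = s
    · rw [if_pos hfull]
      have hk : s.toNat - an.length = 1 := by simp at hfull; omega
      by_cases hrest : rest = []
      · subst hrest
        have hcond : ([n, t, p] :: ([] : List (List Int))).length + an.length ≤ s.toNat := by
          simp at hfull ⊢; omega
        rw [if_pos hcond]
        simp [fixParent_eq, goA, get1, get2]
      · have hcond : ¬ (([n, t, p] :: rest).length + an.length ≤ s.toNat) := by
          have := List.length_pos_iff.mpr hrest
          simp at hfull ⊢; omega
        rw [if_neg hcond, hk]
        simp only [List.take_succ_cons, List.take_zero, List.drop_succ_cons, List.drop_zero]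
        congr 1
        · simp [fixParent_eq, get1, get2]
        · congr 1 <;> push_cast <;> omega
    · rw [if_neg hfull]
      have hlt' : (((an ++ [n]).length : Nat) : Int) < s := by
        simp at hfull ⊢; omega
      rw [ih h3' (i + 1) (an ++ [n]) (at_ ++ [t]) (ap ++ [fixParent p st]) st
            (by simp [hat]) (by simp [hap]) hlt']
      have hk : s.toNat - (an ++ [n]).length = (s.toNat - an.length) - 1 := by simp; omega
      have hk1 : 1 ≤ s.toNat - an.length := by omega
      have hcond : (rest.length + (an ++ [n]).length ≤ s.toNat) ↔
          (([n, t, p] :: rest).length + an.length ≤ s.toNat) := by simp; omega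
      by_cases hc : ([n, t, p] :: rest).length + an.length ≤ s.toNat
      · rw [if_pos (hcond.mpr hc), if_pos hc]
        have hne : ¬ (an ++ [n] = [] ∧ rest = []) := by simp
        rw [if_neg hne]
        have hne2 : ¬ (an = [] ∧ ([n, t, p] :: rest) = ([] : List (List Int))) := by simp
        rw [if_neg hne2]
        simp [fixParent_eq, get1, get2]
      · rw [if_neg (fun hh => hc (hcond.mp hh)), if_neg hc, hk]
        obtain ⟨m, hm⟩ : ∃ m, s.toNat - an.length = m + 1 := ⟨s.toNat - an.length - 1, by omega⟩
        rw [hm]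
        simp only [Nat.add_sub_cancel, List.take_succ_cons, List.drop_succ_cons, List.map_cons,
          get0, get1, get2, List.append_assoc, List.singleton_append]
        congr 2
        · simp [fixParent_eq]
        · omega
        · push_cast; ring

-- A with a non-positive split size never resets: one chunk with offset 0.
theorem goA_nosplit (s : Int) (hs : s ≤ 0) :
    ∀ (items : List (List Int)), (∀ x ∈ items, ∃ n t p, x = [n, t, p]) →
    ∀ (i : Nat) (an at_ ap : List Int) (st : Int),
    goA items i an at_ ap st s =
      if an = [] ∧ items = [] then [] else
        [(an ++ items.map (fun x => PySem.List.pyGetD x 0 0),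
          at_ ++ items.map (fun x => PySem.List.pyGetD x 1 0),
          ap ++ items.map (fun x => max 0 (PySem.List.pyGetD x 2 0 - st)))] := by
  intro items
  induction items with
  | nil =>
    intro _ i an at_ ap st
    by_cases han : an = []
    · simp [goA, han]
    · have : an.length > 0 := List.length_pos_iff.mpr han
      simp [goA, han, this]
  | cons x rest ih =>
    intro h3 i an at_ ap st
    obtain ⟨n, t, p, rfl⟩ := h3 _ (List.mem_cons_self)
    have h3' : ∀ y ∈ rest, ∃ n t p, y = [n, t, p] := fun y hy => h3 y (List.mem_cons_of_mem _ hy)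
    simp only [goA]
    have hne : ¬ (((an ++ [n]).length : Int) = s) := by simp; omega
    rw [if_neg hne, ih h3' (i + 1) (an ++ [n]) (at_ ++ [t]) (ap ++ [fixParent p st]) st]
    have hne2 : ¬ (an ++ [n] = [] ∧ rest = []) := by simp
    rw [if_neg hne2]
    have hne3 : ¬ (an = [] ∧ ([n, t, p] :: rest) = ([] : List (List Int))) := by simp
    rw [if_neg hne3]
    simp [fixParent_eq, get1, get2]

-- unfolding B's while loop one iteration
theorem goB_eq (items : List (List Int)) (step : Int) (base : Nat) :
    goB items step base =
      if base < items.length ∧ 0 < step then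
        ((PySem.List.slice items (some (base : Int)) (some ((base : Int) + step))).map
            (fun x => PySem.List.pyGetD x 0 0),
         (PySem.List.slice items (some (base : Int)) (some ((base : Int) + step))).map
            (fun x => PySem.List.pyGetD x 1 0),
         (PySem.List.slice items (some (base : Int)) (some ((base : Int) + step))).map
            (fun x => max 0 (PySem.List.pyGetD x 2 0 - (if base = 0 then 0 else (base : Int) - 1)))) ::
          goB items step (base + step.toNat)
      else [] := by
  rw [goB]
  split <;> rfl

-- the glue: A restarted at a chunk boundary equals B's while loop from that base (0 < s)
theorem goA_goB (s : Int) (hs : 0 < s) (items : List (List Int))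
    (h3 : ∀ x ∈ items, ∃ n t p, x = [n, t, p]) :
    ∀ (rem base : Nat), items.length - base ≤ rem →
    goA (items.drop base) base [] [] [] (if base = 0 then 0 else (base : Int) - 1) s
      = goB items s base := by
  intro rem
  induction rem with
  | zero =>
    intro base hb
    have hge : items.length ≤ base := by omega
    have hnc : ¬ (base < items.length ∧ 0 < s) := fun hcon => absurd hcon.1 (Nat.not_lt.mpr hge)
    rw [List.drop_eq_nil_of_le hge, goB_eq, if_neg hnc]
    simp [goA]
  | succ m ih =>
    intro base hb
    by_cases hlt : base < items.length
    · have h3' : ∀ x ∈ items.drop base, ∃ n t p, x = [n, t, p] :=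
        fun x hx => h3 x (List.mem_of_mem_drop hx)
      rw [goA_chunk s hs _ h3' base [] [] [] _ rfl rfl (by simpa using hs)]
      simp only [List.length_drop, List.length_nil, Nat.add_zero,
        Nat.sub_zero, List.nil_append]
      have hd : items.drop base ≠ [] := by
        intro hh; have := List.drop_eq_nil_iff.mp hh; omega
      have hsl : PySem.List.slice items (some (base : Int)) (some ((base : Int) + s))
          = (items.drop base).take s.toNat := by
        have h1 : (base : Int) + s = (base : Int) + (s.toNat : Int) := by omega
        rw [h1, PySem.List.slice_natCast_add]
      rw [goB_eq, if_pos (show base < items.length ∧ 0 < s from ⟨hlt, hs⟩), hsl]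
      by_cases hc : items.length - base ≤ s.toNat
      · rw [if_pos hc, if_neg (show ¬(True ∧ items.drop base = []) from by simp [hd])]
        have hts : (items.drop base).length ≤ s.toNat := by rw [List.length_drop]; omega
        rw [List.take_of_length_le hts]
        have hnext : ¬ (base + s.toNat < items.length ∧ 0 < s) := by
          intro hcon
          obtain ⟨h1, -⟩ := hcon
          omega
        rw [goB_eq, if_neg hnext]
      · rw [if_neg hc]
        have hdd : (items.drop base).drop s.toNat = items.drop (base + s.toNat) := by
          rw [List.drop_drop]
        rw [hdd]
        have hrec := ih (base + s.toNat) (by omega)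
        rw [if_neg (show ¬(base + s.toNat = 0) from by omega)] at hrec
        have hst : ((base : Int) + ((s.toNat : Nat) : Int) - 1) = ((base + s.toNat : Nat) : Int) - 1 := by
          push_cast; ring
        rw [hst, hrec]
    · have hge : items.length ≤ base := by omega
      have hnc : ¬ (base < items.length ∧ 0 < s) := fun hcon => absurd hcon.1 hlt
      rw [List.drop_eq_nil_of_le hge, goB_eq, if_neg hnc]
      simp [goA]

-- per-sample equality
theorem persample (sample : List (List Int)) (s : Int)
    (hpre : sample.length = 3 ∨ sample = [] ∨ [] ∈ sample) :
    goA (pyzip sample) 0 [] [] [] 0 s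
      = goB (pyzip sample) (if 0 < s then s else ((pyzip sample).length : Int)) 0 := by
  by_cases hz : pyzip sample = []
  · rw [hz, goB_eq]
    simp [goA]
  · have h3 : ∀ x ∈ pyzip sample, ∃ n t p, x = [n, t, p] := by
      intro x hx
      have hlen : x.length = sample.length := pyzip_mem_length sample x hx
      have hs3 : sample.length = 3 := by
        rcases hpre with h | h | h
        · exact h
        · exact absurd (by rw [h]; rfl) hz
        · exact absurd (pyzip_eq_nil_of_mem_nil sample h) hz
      rw [hs3] at hlen
      match x, hlen with
      | [n, t, p], _ => exact ⟨n, t, p, rfl⟩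
    by_cases hs : 0 < s
    · rw [if_pos hs]
      have := goA_goB s hs (pyzip sample) h3 (pyzip sample).length 0 (by omega)
      simpa using this
    · rw [if_neg hs]
      rw [goA_nosplit s (by omega) _ h3 0 [] [] [] 0]
      have hlen : 0 < (pyzip sample).length := List.length_pos_iff.mpr hz
      rw [if_neg (by simp [hz])]
      rw [goB_eq, if_pos (show 0 < (pyzip sample).length ∧ 0 < ((pyzip sample).length : Int)
        from ⟨hlen, by exact_mod_cast hlen⟩)]
      have hsl : PySem.List.slice (pyzip sample) (some ((0 : Nat) : Int))
          (some (((0 : Nat) : Int) + (((pyzip sample).length : Nat) : Int))) = pyzip sample := by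
        rw [PySem.List.slice_natCast_add, List.drop_zero, List.take_of_length_le (le_refl _)]
      rw [hsl]
      simp only [Int.toNat_natCast, Nat.zero_add]
      rw [goB_eq, if_neg (show ¬((pyzip sample).length < (pyzip sample).length ∧
        0 < ((pyzip sample).length : Int)) from fun hcon => absurd hcon.1 (lt_irrefl _))]
      simp

-- ===== VERDICT (by name: the statement is the Claim_ definition above) =====
theorem data_gen_spec : Claim_equal_data_gen := by
  intro data s hdom hpre
  clear hdom
  unfold Spec_data_gen data_gen data_gen_alt
  induction data with
  | nil => rfl
  | cons sample rest ih =>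
    simp only [List.flatMap_cons]
    rw [persample sample s (hpre sample List.mem_cons_self),
        ih (fun x hx => hpre x (List.mem_cons_of_mem _ hx))]
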